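-- pv_equiv track=rewrite | github.com/epilectrik/voynich | phases/MATERIAL_MAPPING_V2/scripts/12_all_categories_validation.py | get_handling_type
-- ===== SOURCE A (Python) =====
-- from collections import Counter, defaultdict
--
-- prefix_to_role = {
--     'qo': 'ESCAPE',
--     'ok': 'AUX',
--     'ot': 'AUX',
--     'da': 'FLOW',
--     'ol': 'LINK',
--     'or': 'LINK',
--     'al': 'LINK',
--     'ar': 'LINK',
--     'ch': 'PHASE',
--     'sh': 'PHASE',
--     'k': 'ENERGY',
--     's': 'STATE',
-- }
--
-- handling_to_roles = {
--     'gentle': ['ESCAPE', 'LINK'],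
--     'standard': ['PHASE', 'ENERGY'],
--     'careful': ['PHASE', 'AUX'],
--     'intense': ['ENERGY', 'PHASE'],
--     'precision': ['ESCAPE', 'AUX'],
-- }
--
-- def get_handling_type(prefix_profile):
--     """Assign handling type based on PREFIX profile."""
--     if not prefix_profile:
--         return 'unknown'
--
--     role_counts = Counter()
--     for prefix, weight in prefix_profile.items():
--         if prefix in prefix_to_role:
--             role_counts[prefix_to_role[prefix]] += weight
--
--     if not role_counts:
--         return 'unknown'
--
--     best_handling = None
--     best_score = -1
--
--     for handling, expected_roles in handling_to_roles.items():
--         score = sum(role_counts.get(r, 0) for r in expected_roles)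
--         if score > best_score:
--             best_score = score
--             best_handling = handling
--
--     return best_handling
-- ===== SOURCE B (Python) =====
-- prefix_to_role = {
--     'qo': 'ESCAPE',
--     'ok': 'AUX',
--     'ot': 'AUX',
--     'da': 'FLOW',
--     'ol': 'LINK',
--     'or': 'LINK',
--     'al': 'LINK',
--     'ar': 'LINK',
--     'ch': 'PHASE',
--     'sh': 'PHASE',
--     'k': 'ENERGY',
--     's': 'STATE',
-- }
--
-- handling_to_roles = {
--     'gentle': ['ESCAPE', 'LINK'],
--     'standard': ['PHASE', 'ENERGY'],
--     'careful': ['PHASE', 'AUX'],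
--     'intense': ['ENERGY', 'PHASE'],
--     'precision': ['ESCAPE', 'AUX'],
-- }
--
-- # inverted index: role -> handlings whose role list contains it
-- role_to_handlings = {}
-- for _h, _roles in handling_to_roles.items():
--     for _r in _roles:
--         role_to_handlings.setdefault(_r, []).append(_h)
--
-- def get_handling_type(prefix_profile):
--     """Assign handling type via an inverted role->handlings index, one pass."""
--     scores = {h: 0 for h in handling_to_roles}
--     matched = False
--     for prefix, weight in prefix_profile.items():
--         role = prefix_to_role.get(prefix)
--         if role is None:
--             continue
--         matched = True
--         for h in role_to_handlings.get(role, []):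
--             scores[h] += weight
--     if not matched:
--         return 'unknown'
--     best_handling = None
--     best_score = -1
--     for h in handling_to_roles:
--         s = scores[h]
--         if s > best_score:
--             best_score = s
--             best_handling = h
--     return best_handling
-- ===== Notes on version B (the rewrite author's own statement) =====
-- stated objective: alternative
-- what changed: Replaces A's Counter-of-roles plus per-handling re-summation with a precomputed inverted index role->handlings and a single accumulation pass that adds each prefix weight directly into per-handling scores, then a plain max scan over the fixed handling order.
-- outside the precondition, e.g. on get_handling_type({'qo': -1, 'ch': -1, 'ok': -1}): A returns None, B returns None
import Mathlib
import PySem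

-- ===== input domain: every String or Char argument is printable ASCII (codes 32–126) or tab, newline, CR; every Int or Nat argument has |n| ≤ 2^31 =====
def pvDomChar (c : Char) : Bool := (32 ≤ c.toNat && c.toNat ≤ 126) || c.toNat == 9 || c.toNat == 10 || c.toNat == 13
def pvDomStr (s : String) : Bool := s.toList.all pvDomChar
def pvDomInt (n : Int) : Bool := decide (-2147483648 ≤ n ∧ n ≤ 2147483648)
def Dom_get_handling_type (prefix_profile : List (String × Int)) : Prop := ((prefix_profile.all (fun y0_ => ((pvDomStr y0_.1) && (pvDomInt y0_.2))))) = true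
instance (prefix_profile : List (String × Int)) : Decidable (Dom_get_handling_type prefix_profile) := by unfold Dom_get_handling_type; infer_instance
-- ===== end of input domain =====

-- B replaces A's Counter-of-roles + per-handling re-summation with an inverted role->handlings
-- index and one accumulation pass into per-handling scores (alternative decomposition, same cost class).


-- ===== PORT A =====
-- module constants (literal dicts with distinct keys)
def prefixToRole : PySem.Dict String String := PySem.Dict.mk
  [("qo","ESCAPE"),("ok","AUX"),("ot","AUX"),("da","FLOW"),("ol","LINK"),("or","LINK"),
   ("al","LINK"),("ar","LINK"),("ch","PHASE"),("sh","PHASE"),("k","ENERGY"),("s","STATE")]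

def handlingToRoles : List (String × List String) :=
  [("gentle", ["ESCAPE","LINK"]), ("standard", ["PHASE","ENERGY"]), ("careful", ["PHASE","AUX"]),
   ("intense", ["ENERGY","PHASE"]), ("precision", ["ESCAPE","AUX"])]

-- loop body: role_counts[prefix_to_role[prefix]] += weight (skipping unknown prefixes)
def countRole (rc : PySem.Dict String Int) (q : String × Int) : PySem.Dict String Int :=
  match prefixToRole.get? q.1 with
  | some r => rc.modify r 0 (· + q.2)
  | none => rc

def get_handling_type (prefix_profile : List (String × Int)) : String :=
  let d := PySem.Dict.ofList prefix_profile
  if d.items = [] then "unknown"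
  else
    -- role_counts = Counter(); for prefix, weight in ...: role_counts[prefix_to_role[prefix]] += weight
    let role_counts : PySem.Dict String Int := d.items.foldl countRole PySem.Dict.empty
    if role_counts.items = [] then "unknown"
    else
      let res := handlingToRoles.foldl
        (fun (acc : Option String × Int) hr =>
          if hr.2.foldl (fun s r => s + role_counts.getD r 0) 0 > acc.2
          then (some hr.1, hr.2.foldl (fun s r => s + role_counts.getD r 0) 0) else acc) (none, -1)
      -- Python returns best_handling (None when no score beat -1; excluded by Pre_)
      res.1.getD ""

-- ===== PORT B =====
-- role_to_handlings built from handling_to_roles by setdefault/append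
def roleToHandlings : PySem.Dict String (List String) :=
  handlingToRoles.foldl
    (fun d hr => hr.2.foldl (fun d r => d.modify r [] (· ++ [hr.1])) d) PySem.Dict.empty

-- loop body: add the weight to every handling listed for the prefix's role; set the matched flag
def accumScores (st : PySem.Dict String Int × Bool) (q : String × Int) :
    PySem.Dict String Int × Bool :=
  match prefixToRole.get? q.1 with
  | none => st
  | some role =>
      ((roleToHandlings.getD role []).foldl (fun sc h => sc.modify h 0 (· + q.2)) st.1, true)

def get_handling_type_alt (prefix_profile : List (String × Int)) : String :=
  let init : PySem.Dict String Int :=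
    handlingToRoles.foldl (fun d hr => d.insert hr.1 0) PySem.Dict.empty
  let st := (PySem.Dict.ofList prefix_profile).items.foldl accumScores (init, false)
  if st.2 = false then "unknown"
  else
    let res := handlingToRoles.foldl
      (fun (acc : Option String × Int) hr =>
        if st.1.getD hr.1 0 > acc.2 then (some hr.1, st.1.getD hr.1 0) else acc) (none, -1)
    res.1.getD ""

-- ===== PRECONDITION & SPEC =====
-- Pre_ excludes the inputs on which some prefix maps to a role yet every handling's summed score
-- is ≤ -1 (only possible with negative weights): there Python A returns None, not a str.
def pvRoleSum (prefix_profile : List (String × Int)) (r : String) : Int :=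
  (PySem.Dict.ofList prefix_profile).items.foldl
    (fun s q => if prefixToRole.get? q.1 = some r then s + q.2 else s) 0

def Pre_get_handling_type (prefix_profile : List (String × Int)) : Prop :=
  ((PySem.Dict.ofList prefix_profile).items.any (fun q => prefixToRole.contains q.1)) = true →
    (pvRoleSum prefix_profile "ESCAPE" + pvRoleSum prefix_profile "LINK" > -1 ∨
     pvRoleSum prefix_profile "PHASE" + pvRoleSum prefix_profile "ENERGY" > -1 ∨
     pvRoleSum prefix_profile "PHASE" + pvRoleSum prefix_profile "AUX" > -1 ∨
     pvRoleSum prefix_profile "ESCAPE" + pvRoleSum prefix_profile "AUX" > -1)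
instance (prefix_profile : List (String × Int)) : Decidable (Pre_get_handling_type prefix_profile) := by
  unfold Pre_get_handling_type; infer_instance

def pvWitness_get_handling_type : (List (String × Int)) := [("qo", 3), ("ch", 1)]

def Spec_get_handling_type (prefix_profile : List (String × Int)) (out : String) : Prop :=
  out = get_handling_type_alt prefix_profile
instance (prefix_profile : List (String × Int)) (out : String) : Decidable (Spec_get_handling_type prefix_profile out) := by
  unfold Spec_get_handling_type; infer_instance

-- ===== CLAIM (what is proved, stated in full; the proofs are below) =====
def Claim_equal_get_handling_type : Prop := ∀ (prefix_profile : List (String × Int)), Dom_get_handling_type prefix_profile → Pre_get_handling_type prefix_profile → Spec_get_handling_type prefix_profile (get_handling_type prefix_profile)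

-- ===== LEMMAS AND PROOFS =====

set_option maxHeartbeats 1000000

-- relation between A's role Counter and B's (handling-scores, matched-flag) state
def RelH (rc sc : PySem.Dict String Int) (m : Bool) : Prop :=
  sc.getD "gentle" 0 = rc.getD "ESCAPE" 0 + rc.getD "LINK" 0 ∧
  sc.getD "standard" 0 = rc.getD "PHASE" 0 + rc.getD "ENERGY" 0 ∧
  sc.getD "careful" 0 = rc.getD "PHASE" 0 + rc.getD "AUX" 0 ∧
  sc.getD "intense" 0 = rc.getD "ENERGY" 0 + rc.getD "PHASE" 0 ∧
  sc.getD "precision" 0 = rc.getD "ESCAPE" 0 + rc.getD "AUX" 0 ∧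
  (m = false ↔ rc.items = [])

lemma modify_ne_nil (d : PySem.Dict String Int) (k : String) (f : Int → Int) :
    ¬ (d.modify k 0 f).items = [] := by
  intro h
  have hc : (d.modify k 0 f).contains k = true := by
    rw [PySem.Dict.contains_modify]; simp
  have hk := (PySem.Dict.contains_iff_mem_keys _ _).mp hc
  simp [PySem.Dict.keys, h] at hk

lemma role_cases (p r : String) (h : prefixToRole.get? p = some r) :
    r = "ESCAPE" ∨ r = "AUX" ∨ r = "FLOW" ∨ r = "LINK" ∨ r = "PHASE" ∨ r = "ENERGY" ∨ r = "STATE" := by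
  have hmem := PySem.Dict.mem_items_of_get?_eq_some _ h
  simp only [prefixToRole, List.mem_cons, Prod.mk.injEq, List.not_mem_nil, or_false] at hmem
  tauto

lemma rth_ESCAPE : roleToHandlings.getD "ESCAPE" [] = ["gentle","precision"] := by decide
lemma rth_AUX : roleToHandlings.getD "AUX" [] = ["careful","precision"] := by decide
lemma rth_FLOW : roleToHandlings.getD "FLOW" [] = [] := by decide
lemma rth_LINK : roleToHandlings.getD "LINK" [] = ["gentle"] := by decide
lemma rth_PHASE : roleToHandlings.getD "PHASE" [] = ["standard","careful","intense"] := by decide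
lemma rth_ENERGY : roleToHandlings.getD "ENERGY" [] = ["standard","intense"] := by decide
lemma rth_STATE : roleToHandlings.getD "STATE" [] = [] := by decide

lemma inv_fold (l : List (String × Int)) (rc sc : PySem.Dict String Int) (m : Bool)
    (h : RelH rc sc m) :
    RelH (l.foldl countRole rc)
         (l.foldl accumScores (sc, m)).1
         (l.foldl accumScores (sc, m)).2 := by
  induction l generalizing rc sc m with
  | nil => exact h
  | cons q t ih =>
    simp only [List.foldl_cons]
    rcases hq : prefixToRole.get? q.1 with _ | r
    · simp only [countRole, accumScores, hq]
      exact ih rc sc m h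
    · simp only [countRole, accumScores, hq]
      obtain ⟨h1, h2, h3, h4, h5, h6⟩ := h
      rcases role_cases q.1 r hq with rfl | rfl | rfl | rfl | rfl | rfl | rfl <;>
      · apply ih
        refine ⟨?_, ?_, ?_, ?_, ?_, ?_⟩ <;>
        · simp [rth_ESCAPE, rth_AUX, rth_FLOW, rth_LINK, rth_PHASE, rth_ENERGY, rth_STATE,
                List.foldl_cons, List.foldl_nil, PySem.Dict.getD_modify, modify_ne_nil]
          try omega

lemma sel_eq (rc sc : PySem.Dict String Int)
    (h1 : sc.getD "gentle" 0 = rc.getD "ESCAPE" 0 + rc.getD "LINK" 0)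
    (h2 : sc.getD "standard" 0 = rc.getD "PHASE" 0 + rc.getD "ENERGY" 0)
    (h3 : sc.getD "careful" 0 = rc.getD "PHASE" 0 + rc.getD "AUX" 0)
    (h4 : sc.getD "intense" 0 = rc.getD "ENERGY" 0 + rc.getD "PHASE" 0)
    (h5 : sc.getD "precision" 0 = rc.getD "ESCAPE" 0 + rc.getD "AUX" 0) :
    (handlingToRoles.foldl
        (fun (acc : Option String × Int) hr =>
          if hr.2.foldl (fun s r => s + rc.getD r 0) 0 > acc.2
          then (some hr.1, hr.2.foldl (fun s r => s + rc.getD r 0) 0) else acc) (none, -1)) =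
    (handlingToRoles.foldl
        (fun (acc : Option String × Int) hr =>
          if sc.getD hr.1 0 > acc.2 then (some hr.1, sc.getD hr.1 0) else acc) (none, -1)) := by
  simp only [handlingToRoles, List.foldl, h1, h2, h3, h4, h5, zero_add]

theorem get_handling_type_spec : Claim_equal_get_handling_type := by
  intro pp _ _
  show get_handling_type pp = get_handling_type_alt pp
  simp only [get_handling_type, get_handling_type_alt]
  have hrel : RelH PySem.Dict.empty
      (handlingToRoles.foldl (fun d hr => d.insert hr.1 0) PySem.Dict.empty) false := by
    refine ⟨by decide, by decide, by decide, by decide, by decide, by decide⟩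
  have H := inv_fold (PySem.Dict.ofList pp).items _ _ _ hrel
  obtain ⟨h1, h2, h3, h4, h5, h6⟩ := H
  by_cases hnil : (PySem.Dict.ofList pp).items = []
  · rw [hnil]
    rfl
  · rw [if_neg hnil]
    by_cases hrc : (((PySem.Dict.ofList pp).items).foldl countRole PySem.Dict.empty).items = []
    · rw [if_pos hrc, if_pos (h6.mpr hrc)]
    · rw [if_neg hrc, if_neg (fun hf => hrc (h6.mp hf))]
      rw [sel_eq _ _ h1 h2 h3 h4 h5]
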